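-- pv_equiv track=rewrite | github.com/dzhao14/HackerRank_code | practice/algorithms/implementation/bigger_is_greater.py | solution
-- ===== SOURCE A (Python) =====
-- from itertools import permutations
--
-- def solution(s):
--     arr = [ord(i) for i in s]
--     a = permutations(arr)
--     b = a.__next__()
--     try:
--         out = a.__next__()
--         outs = [chr(i) for i in out]
--         return str(outs)#[1:-1].replace(" ","").replace(",","").replace("\'","")
--     except:
--         return "no answer"
-- ===== SOURCE B (Python) =====
-- def solution(s):
--     r = list(reversed(s))
--     if len(r) < 2:
--         return "no answer"
--     r[0], r[1] = r[1], r[0]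
--     return str(list(reversed(r)))
-- ===== Notes on version B (the rewrite author's own statement) =====
-- stated objective: simpler
-- what changed: B drops the itertools.permutations generator and its exception-driven StopIteration path: for strings of length at least 2 it swaps the last two characters directly (the second positional permutation) and formats with str(), falling back to the fixed no-answer string otherwise.
import Mathlib
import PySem

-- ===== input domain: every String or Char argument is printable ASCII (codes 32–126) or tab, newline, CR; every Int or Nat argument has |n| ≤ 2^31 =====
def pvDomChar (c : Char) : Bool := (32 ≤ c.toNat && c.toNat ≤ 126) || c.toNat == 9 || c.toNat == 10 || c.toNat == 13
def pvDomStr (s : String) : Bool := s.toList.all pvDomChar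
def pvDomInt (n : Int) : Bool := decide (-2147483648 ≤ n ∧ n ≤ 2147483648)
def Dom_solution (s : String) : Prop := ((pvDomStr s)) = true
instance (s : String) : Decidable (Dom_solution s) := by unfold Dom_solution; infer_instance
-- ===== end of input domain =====

-- B replaces the itertools.permutations generator and its StopIteration path with a
-- direct swap of the last two characters (simpler; same return value everywhere).

-- Shared rendering of Python's str(list_of_single_char_strings), e.g. "['a', 'c', 'b']".
-- Exact on the Dom_solution character set (printable ASCII, tab, newline, CR):
-- repr of a one-char string is the char in single quotes, except '\'' → "'", '\\' → '\\\\',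
-- and the escapes \t \n \r.
def pyReprChar (c : Char) : String :=
  if c = '\'' then "\"'\""
  else if c = '\\' then "'\\\\'"
  else if c = '\t' then "'\\t'"
  else if c = '\n' then "'\\n'"
  else if c = '\r' then "'\\r'"
  else "'" ++ String.ofList [c] ++ "'"

def pyStrCharList (l : List Char) : String :=
  "[" ++ String.intercalate ", " (l.map pyReprChar) ++ "]"

-- ===== PORT A =====
-- A drives itertools.permutations by hand: the first __next__ returns the pool itself,
-- the second runs one pass of the generator's for-loop over (indices, cycles) state
-- (the documented pure-Python equivalent of itertools.permutations with r = n);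
-- if that pass finds no i with cycles[i] ≠ 0 (n ≤ 1), StopIteration → "no answer".
def permNextLoop (pool : List Int) (n : Nat) (indices cycles : List Nat) :
    Nat → Option (List Int)
  | 0 => none                      -- 'for i in reversed(range(r))' exhausted: StopIteration
  | k + 1 =>
    let i := k
    let ci := cycles.getD i 0 - 1  -- cycles[i] -= 1
    if ci = 0 then
      -- indices[i:] = indices[i+1:] + indices[i:i+1]; cycles[i] = n - i
      let indices' := indices.take i ++ (indices.drop (i + 1) ++ (indices.drop i).take 1)
      let cycles' := cycles.set i (n - i)
      permNextLoop pool n indices' cycles' k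
    else
      -- j = cycles[i]; indices[i], indices[-j] = indices[-j], indices[i]; yield
      let j := ci
      let indices' := (indices.set i (indices.getD (n - j) 0)).set (n - j) (indices.getD i 0)
      some (indices'.map (fun idx => pool.getD idx 0))

def solution (s : String) : String :=
  let arr : List Int := s.toList.map (fun c => (c.toNat : Int))   -- [ord(i) for i in s]
  let n := arr.length
  let _b := arr                                                   -- b = a.__next__() (identity permutation)
  let second :=
    if n = 0 then none                                            -- 'while n:' never entered
    else permNextLoop arr n (List.range n) ((List.range n).map (fun i => n - i)) n
  match second with
  | some out => pyStrCharList (out.map (fun i => Char.ofNat i.toNat))  -- str([chr(i) for i in out])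
  | none => "no answer"

-- ===== PORT B =====
def solution_alt (s : String) : String :=
  match s.toList.reverse with
  | a :: b :: t => pyStrCharList ((b :: a :: t).reverse)
  | _ => "no answer"

-- ===== PRECONDITION & SPEC =====
def Spec_solution (s : String) (out : String) : Prop := out = solution_alt s
instance (s : String) (out : String) : Decidable (Spec_solution s out) := by unfold Spec_solution; infer_instance

-- ===== CLAIM (what is proved, stated in full; the proofs are below) =====
def Claim_equal_solution : Prop := ∀ (s : String), Dom_solution s → Spec_solution s (solution s)

-- ===== LEMMAS AND PROOFS =====

-- (range m).map (arr.getD · d) = arr.take m when m ≤ arr.length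
theorem map_range_getD (arr : List Int) (m : Nat) (d : Int) (h : m ≤ arr.length) :
    (List.range m).map (fun idx => arr.getD idx d) = arr.take m := by
  apply List.ext_getElem
  · simp [Nat.min_eq_left h]
  · intro i h1 h2
    simp only [List.getElem_map, List.getElem_range, List.getElem_take]
    rw [List.getD_eq_getElem _ _ (by simp at h1 ⊢; omega)]

-- the generator's second __next__ on fresh state yields the pool with its last two entries swapped
theorem permNextLoop_fresh (pool : List Int) (m : Nat) (hlen : pool.length = m + 2) :
    permNextLoop pool (m + 2) (List.range (m + 2))
      ((List.range (m + 2)).map (fun i => (m + 2) - i)) (m + 2) =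
    some (pool.take m ++ [pool.getD (m + 1) 0, pool.getD m 0]) := by
  -- first iteration: i = m+1, cycles[i] = 1 -> 0, rotation of the singleton tail is a no-op
  have hc1 : (((List.range (m + 2)).map (fun i => (m + 2) - i)).getD (m + 1) 0) = 1 := by
    rw [List.getD_eq_getElem _ _ (by simp)]
    simp
  have hidx : (List.range (m + 2)).take (m + 1) ++
      (((List.range (m + 2)).drop (m + 2)) ++ ((List.range (m + 2)).drop (m + 1)).take 1) =
      List.range (m + 2) := by
    have h1 : List.range (m + 2) = List.range (m + 1) ++ [m + 1] := by
      simpa using List.range_succ (n := m + 1)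
    rw [h1]
    simp
  have hc2 : ((((List.range (m + 2)).map (fun i => (m + 2) - i)).set (m + 1) 1).getD m 0) = 2 := by
    rw [List.getD_eq_getElem _ _ (by simp)]
    rw [List.getElem_set_ne (by omega)]
    simp
  unfold permNextLoop
  simp only [hc1, hidx]
  norm_num
  unfold permNextLoop
  simp only [show (m + 2 - (m + 1) : Nat) = 1 by omega, hc2]
  norm_num
  have hpool : List.map (fun idx => pool[idx]?.getD 0) (List.range (m + 2)) = pool := by
    have h := map_range_getD pool (m + 2) 0 (by omega)
    simpa [List.getD_eq_getElem?_getD, List.take_of_length_le, hlen] using h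
  rw [hpool]
  apply List.ext_getElem
  · simp [hlen]
  · intro i hi _
    simp only [List.length_set, hlen] at hi
    rcases Nat.lt_trichotomy i m with h | h | h
    · rw [List.getElem_set_ne (by omega), List.getElem_set_ne (by omega)]
      rw [List.getElem_append_left (by simp [hlen]; omega)]
      simp
    · subst h
      rw [List.getElem_set_ne (by omega), List.getElem_set_self]
      rw [List.getElem_append_right (by simp [hlen])]
      simp [hlen]
    · have hieq : i = m + 1 := by omega
      subst hieq
      rw [List.getElem_set_self]
      rw [List.getElem_append_right (by simp [hlen])]
      simp [hlen]

-- chr(ord(c)) = c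
theorem chr_ord (c : Char) : Char.ofNat ((c.toNat : Int)).toNat = c := by
  simp [Char.ofNat_toNat]

-- ===== VERDICT (by name: the statement is the Claim_ definition above) =====
theorem solution_spec : Claim_equal_solution := by
  intro s _
  unfold Spec_solution solution solution_alt
  match hrev : s.toList.reverse with
  | [] =>
    have h0 : s.toList = [] := by simpa using congrArg List.reverse hrev
    simp [h0]
  | [a] =>
    have h1 : s.toList = [a] := by simpa using congrArg List.reverse hrev
    simp [h1, permNextLoop, List.range_succ]
  | a :: b :: t =>
    have hl : s.toList = t.reverse ++ [b, a] := by
      have := congrArg List.reverse hrev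
      simpa using this
    set l := s.toList with hldef
    have hlen : l.length = t.length + 2 := by simp [hl]
    simp only [hl]
    have hlen' : ((t.reverse ++ [b, a]).map (fun c => (c.toNat : Int))).length = t.length + 2 := by
      simp
    rw [show ((t.reverse ++ [b, a]).map (fun c => (c.toNat : Int))).length = t.length + 2 from hlen']
    have hne : (t.length + 2 : Nat) ≠ 0 := by omega
    simp only [hne, if_false]
    rw [permNextLoop_fresh _ t.length hlen']
    have harr : (t.reverse ++ [b, a]).map (fun c => (c.toNat : Int)) =
        (t.reverse.map (fun c => (c.toNat : Int))) ++ [(b.toNat : Int), (a.toNat : Int)] := by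
      simp
    have htake : ((t.reverse ++ [b, a]).map (fun c => (c.toNat : Int))).take t.length =
        t.reverse.map (fun c => (c.toNat : Int)) := by
      rw [harr, List.take_append_of_le_length (by simp)]
      simp
    have hg1 : ((t.reverse ++ [b, a]).map (fun c => (c.toNat : Int))).getD (t.length + 1) 0 =
        (a.toNat : Int) := by
      rw [harr, List.getD_eq_getElem _ _ (by simp)]
      rw [List.getElem_append_right (by simp)]
      simp
    have hg2 : ((t.reverse ++ [b, a]).map (fun c => (c.toNat : Int))).getD t.length 0 =
        (b.toNat : Int) := by
      rw [harr, List.getD_eq_getElem _ _ (by simp)]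
      rw [List.getElem_append_right (by simp)]
      simp
    rw [htake, hg1, hg2]
    have hid : ∀ (u : List Char),
        List.map (fun i : Int => Char.ofNat i.toNat) (List.map (fun c => (c.toNat : Int)) u) = u := by
      intro u
      induction u with
      | nil => rfl
      | cons c cs ih => simp only [List.map_cons, ih, chr_ord]
    show pyStrCharList (List.map (fun i : Int => Char.ofNat i.toNat)
        (List.map (fun c => (c.toNat : Int)) t.reverse ++ [(a.toNat : Int), (b.toNat : Int)])) =
      pyStrCharList (b :: a :: t).reverse
    rw [List.map_append, hid]
    simp only [List.map_cons, List.map_nil, chr_ord]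
    simp
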